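-- pv_equiv track=rewrite | github.com/nascarsayan/lintcode | 1007.py | xorGame
-- ===== SOURCE A (Python) =====
-- def xorGame(nums):
--   # write your code here
--   x = set()
--   for num in nums:
--     if num not in x:
--       x.add(num)
--     else:
--       x.remove(num)
--   if len(x) == 1:
--     return x.pop() == 0
--   return len(x) % 2 == 0
-- ===== SOURCE B (Python) =====
-- def xorGame(nums):
--   # write your code here
--   s = sorted(nums)
--   odds = []
--   i = 0
--   while i < len(s):
--     if i + 1 < len(s) and s[i] == s[i + 1]:
--       i += 2
--     else:
--       odds.append(s[i])
--       i += 1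
--   if len(odds) == 1:
--     return odds[0] == 0
--   return len(odds) % 2 == 0
-- ===== Notes on version B (the rewrite author's own statement) =====
-- stated objective: alternative
-- what changed: Replaces the hash-set toggling pass with sorting followed by greedy adjacent-pair cancellation: equal neighbours in the sorted list cancel in pairs, leaving exactly the odd-multiplicity values, to which the same final decision is applied.
import Mathlib
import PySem

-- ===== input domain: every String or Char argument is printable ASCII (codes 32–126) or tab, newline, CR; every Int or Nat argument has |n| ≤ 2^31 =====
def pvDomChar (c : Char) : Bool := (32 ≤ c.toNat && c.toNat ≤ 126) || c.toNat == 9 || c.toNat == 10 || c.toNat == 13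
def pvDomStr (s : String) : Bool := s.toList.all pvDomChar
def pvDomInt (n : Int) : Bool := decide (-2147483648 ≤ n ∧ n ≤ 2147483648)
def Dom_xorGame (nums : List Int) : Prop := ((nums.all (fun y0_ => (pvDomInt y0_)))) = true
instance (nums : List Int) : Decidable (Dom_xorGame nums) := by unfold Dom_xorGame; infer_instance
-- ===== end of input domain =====

-- B replaces A's hash-set toggling pass with sort-then-greedy-adjacent-pair cancellation (different algorithm, similar cost).


-- ===== PORT A =====
-- single pass: toggle membership of num in the set x; the else-branch 'x.remove(num)'
-- fires only when num ∈ x, where Set.discard computes exactly set.remove.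
-- x.pop() is taken only when len(x) == 1, where the popped element is the unique one (headD 0).
def xorGame (nums : List Int) : Bool :=
  let x : PySem.Set Int :=
    nums.foldl (fun x num =>
      if PySem.Set.contains x num = false then PySem.Set.add x num
      else PySem.Set.discard x num) PySem.Set.empty
  if PySem.Set.len x = 1 then x.headD 0 == 0
  else decide (PySem.Set.len x % 2 = 0)

-- ===== PORT B =====
-- the while-loop over the sorted list: if the next two elements are equal, skip both (i += 2);
-- otherwise record the current element as odd-multiplicity and advance by one (i += 1).
def pairScan : List Int → List Int
  | [] => []
  | [a] => [a]
  | a :: b :: t => if a == b then pairScan t else a :: pairScan (b :: t)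

-- sorted(nums), then the pair-cancellation scan, then the same tail decision on odds.
def xorGame_alt (nums : List Int) : Bool :=
  let s := PySem.List.sorted nums (fun x => x) false
  let odds := pairScan s
  if odds.length = 1 then odds.headD 0 == 0
  else decide (odds.length % 2 = 0)

-- ===== PRECONDITION & SPEC =====
def Spec_xorGame (nums : List Int) (out : Bool) : Prop := out = xorGame_alt nums
instance (nums : List Int) (out : Bool) : Decidable (Spec_xorGame nums out) := by unfold Spec_xorGame; infer_instance

-- ===== CLAIM (what is proved, stated in full; the proofs are below) =====
def Claim_equal_xorGame : Prop := ∀ (nums : List Int), Dom_xorGame nums → Spec_xorGame nums (xorGame nums)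

-- ===== LEMMAS AND PROOFS =====

-- A's toggling loop: starting from a nodup set s, the result is nodup and membership is
-- "x was in s" XOR "x occurs an odd number of times in nums".
theorem toggle_invariant (nums : List Int) : ∀ (s : List Int), s.Nodup →
    (List.foldl (fun x num =>
      if PySem.Set.contains x num = false then PySem.Set.add x num
      else PySem.Set.discard x num) s nums).Nodup ∧
    ∀ v, (v ∈ List.foldl (fun x num =>
      if PySem.Set.contains x num = false then PySem.Set.add x num
      else PySem.Set.discard x num) s nums ↔ ((v ∈ s) ↔ nums.count v % 2 = 0)) := by
  induction nums with
  | nil => intro s hs; exact ⟨hs, fun v => by simp⟩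
  | cons a t ih =>
    intro s hs
    by_cases hmem : a ∈ s
    · have hc : PySem.Set.contains s a = true := (PySem.Set.contains_iff s a).2 hmem
      have hred : (if PySem.Set.contains s a = false then PySem.Set.add s a
          else PySem.Set.discard s a) = PySem.Set.discard s a := by rw [hc]; simp
      simp only [List.foldl_cons, hred]
      have := ih (PySem.Set.discard s a) (PySem.Set.nodup_discard s a hs)
      refine ⟨this.1, fun v => ?_⟩
      rw [(this.2 v)]
      by_cases hva : v = a
      · subst hva
        simp [PySem.Set.mem_discard, hmem, List.count_cons_self]
        omega
      · have h' : ¬ a = v := fun h => hva h.symm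
        simp [PySem.Set.mem_discard, hva, h']
    · have hc : PySem.Set.contains s a = false := by
        by_contra h
        exact hmem ((PySem.Set.contains_iff s a).1 (by simpa using h))
      have hred : (if PySem.Set.contains s a = false then PySem.Set.add s a
          else PySem.Set.discard s a) = PySem.Set.add s a := by rw [hc]; simp
      simp only [List.foldl_cons, hred]
      have := ih (PySem.Set.add s a) (PySem.Set.nodup_add s a hs)
      refine ⟨this.1, fun v => ?_⟩
      rw [(this.2 v)]
      by_cases hva : v = a
      · subst hva
        simp [hmem, List.count_cons_self]
        omega
      · have h' : ¬ a = v := fun h => hva h.symm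
        simp [PySem.Set.mem_add, hva, h']

-- B's scan on a (≤)-sorted list: the survivors are nodup and are exactly the
-- values of odd multiplicity.
theorem pairScan_spec : ∀ (s : List Int), s.Pairwise (· ≤ ·) →
    (pairScan s).Nodup ∧ ∀ v, (v ∈ pairScan s ↔ s.count v % 2 = 1) := by
  intro s
  induction s using pairScan.induct with
  | case1 => intro _; exact ⟨List.nodup_nil, fun v => by simp [pairScan]⟩
  | case2 a => intro _; refine ⟨by simp [pairScan], fun v => ?_⟩
               by_cases hva : v = a
               · subst hva; simp [pairScan]
               · have h' : ¬ a = v := fun h => hva h.symm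
                 simp [pairScan, hva, h']
  | case3 a b t hab ih =>
    intro hp
    have hab' : a = b := by simpa using hab
    subst hab'
    have hpt : t.Pairwise (· ≤ ·) := (List.pairwise_cons.1 (List.pairwise_cons.1 hp).2).2
    have := ih hpt
    refine ⟨by simpa [pairScan] using this.1, fun v => ?_⟩
    have hm : v ∈ pairScan (a :: a :: t) ↔ v ∈ pairScan t := by simp [pairScan, hab]
    rw [hm, this.2 v]
    by_cases hva : v = a
    · subst hva; simp [List.count_cons_self]; omega
    · have h' : ¬ a = v := fun h => hva h.symm
      simp [h']
  | case4 a b t hab ih =>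
    intro hp
    have hab' : ¬ a = b := by simpa using hab
    have hp' : (b :: t).Pairwise (· ≤ ·) := (List.pairwise_cons.1 hp).2
    have hale : ∀ x ∈ b :: t, a ≤ x := (List.pairwise_cons.1 hp).1
    have hble : ∀ x ∈ t, b ≤ x := (List.pairwise_cons.1 hp').1
    have hanotin : a ∉ b :: t := by
      intro h
      rcases List.mem_cons.1 h with h | h
      · exact hab' h
      · exact hab' (le_antisymm (hale b List.mem_cons_self) (hble a h))
    have := ih hp'
    have hcnt0 : (b :: t).count a = 0 := List.count_eq_zero.2 hanotin
    have hanotscan : a ∉ pairScan (b :: t) := by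
      intro h; have := (this.2 a).1 h; rw [hcnt0] at this; omega
    refine ⟨?_, fun v => ?_⟩
    · simpa [pairScan, hab, List.nodup_cons] using ⟨hanotscan, this.1⟩
    · have hm : v ∈ pairScan (a :: b :: t) ↔ v = a ∨ v ∈ pairScan (b :: t) := by
        simp [pairScan, hab]
      rw [hm, this.2 v]
      by_cases hva : v = a
      · subst hva; simp [List.count_cons_self, hcnt0]
      · have h' : ¬ a = v := fun h => hva h.symm
        simp [List.count_cons, h', hva]

-- the two nodup survivor lists are permutations of each other
theorem survivors_perm (nums : List Int) :
    (nums.foldl (fun x num =>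
      if PySem.Set.contains x num = false then PySem.Set.add x num
      else PySem.Set.discard x num) PySem.Set.empty).Perm
    (pairScan (PySem.List.sorted nums (fun x => x) false)) := by
  have hA := toggle_invariant nums [] List.nodup_nil
  have hB := pairScan_spec (PySem.List.sorted nums (fun x => x) false)
    (by simpa using PySem.List.sorted_pairwise nums (fun x => x))
  apply (List.perm_ext_iff_of_nodup hA.1 hB.1).2
  intro v
  rw [hA.2 v, hB.2 v,
    (PySem.List.sorted_perm nums (fun x => x) false).count_eq]
  simp only [List.not_mem_nil, false_iff]
  omega

-- the tail decision depends only on the survivor list's length and, in the singleton case, its element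
theorem tail_eq (SA SB : List Int) (h : SA.Perm SB) :
    (if PySem.Set.len SA = 1 then SA.headD 0 == 0 else decide (PySem.Set.len SA % 2 = 0)) =
    (if SB.length = 1 then SB.headD 0 == 0 else decide (SB.length % 2 = 0)) := by
  have hlen : SA.length = SB.length := h.length_eq
  simp only [PySem.Set.len, hlen]
  by_cases h1 : SB.length = 1
  · rcases List.length_eq_one_iff.1 h1 with ⟨b, hb⟩
    rcases List.length_eq_one_iff.1 (hlen.trans h1) with ⟨a, ha⟩
    subst ha; subst hb
    have hab : a = b := by
      have := (List.Perm.mem_iff h (a := a))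
      simpa using this
    simp [hab]
  · rw [if_neg (by omega : ¬((SB.length : Int) = 1)), if_neg h1, decide_eq_decide]
    omega

-- ===== VERDICT (by name: the statement is the Claim_ definition above) =====
theorem xorGame_spec : Claim_equal_xorGame := by
  intro nums _
  unfold Spec_xorGame xorGame xorGame_alt
  exact tail_eq _ _ (survivors_perm nums)
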